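-- pv_equiv track=rewrite | github.com/mozilla-conduit/mots | src/mots/utils.py | generate_machine_readable_name
-- ===== SOURCE A (Python) =====
-- def generate_machine_readable_name(display_name, keep_case=False):
--     """Turn spaces into underscores, and lower the case. Strip all but alphanumerics."""
--     words = [w.strip() for w in display_name.split(" ")]
--     if keep_case:
--         alnum_words = ["".join([c for c in word if c.isalnum()]) for word in words]
--     else:
--         alnum_words = [
--             "".join([c.lower() for c in word if c.isalnum()]) for word in words
--         ]
--     return "_".join([w for w in alnum_words if w])
-- ===== SOURCE B (Python) =====
-- def generate_machine_readable_name(display_name, keep_case=False):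
--     """Single pass over characters: flush the current word buffer on ' ',
--     keep alnum chars (lowercased unless keep_case), ignore everything else."""
--     results = []
--     buf = []
--     for c in display_name:
--         if c == " ":
--             if buf:
--                 results.append("".join(buf))
--             buf = []
--         elif c.isalnum():
--             buf.append(c if keep_case else c.lower())
--     if buf:
--         results.append("".join(buf))
--     return "_".join(results)
-- ===== Notes on version B (the rewrite author's own statement) =====
-- stated objective: alternative
-- what changed: Replaced the split-on-space / per-word comprehension pipeline (split, strip, filter, join twice) by a single character-at-a-time pass that maintains a results list and a current-word buffer, flushing on each space.
import Mathlib
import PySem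

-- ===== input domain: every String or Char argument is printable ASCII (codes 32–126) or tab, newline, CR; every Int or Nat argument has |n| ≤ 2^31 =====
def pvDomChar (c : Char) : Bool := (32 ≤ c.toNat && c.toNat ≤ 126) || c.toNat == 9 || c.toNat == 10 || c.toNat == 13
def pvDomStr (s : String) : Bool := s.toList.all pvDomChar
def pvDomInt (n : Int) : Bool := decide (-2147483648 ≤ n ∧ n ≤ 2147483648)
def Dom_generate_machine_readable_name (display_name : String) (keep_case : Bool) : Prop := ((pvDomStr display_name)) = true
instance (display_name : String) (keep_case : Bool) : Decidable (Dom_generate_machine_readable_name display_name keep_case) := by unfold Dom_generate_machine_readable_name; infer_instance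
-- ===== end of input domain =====

-- B replaces A's split/strip/filter/join pipeline by one character-at-a-time pass with a
-- word buffer flushed on spaces (alternative decomposition; same return value).

-- ===== PORT A =====
def generate_machine_readable_name (display_name : String) (keep_case : Bool) : String :=
  let words := (PySem.Chars.splitOn display_name.toList [' ']).map PySem.Chars.strip
  let alnum_words :=
    if keep_case then
      words.map (fun word => PySem.Chars.join [] ((word.filter PySem.Chars.isalnum).map (fun c => [c])))
    else
      words.map (fun word => PySem.Chars.join [] ((word.filter PySem.Chars.isalnum).map (fun c => PySem.Chars.lower [c])))
  String.mk (PySem.Chars.join ['_'] (alnum_words.filter (fun w => !w.isEmpty)))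

-- ===== PORT B =====
def generate_machine_readable_name_alt (display_name : String) (keep_case : Bool) : String :=
  let step : List (List Char) × List Char → Char → List (List Char) × List Char := fun st c =>
    if c = ' ' then
      (if st.2.isEmpty then st.1 else st.1 ++ [st.2], [])
    else if PySem.Chars.isalnum c then
      (st.1, st.2 ++ [if keep_case then c else PySem.Chars.lowerChar c])
    else st
  let fin := display_name.toList.foldl step ([], [])
  let results := if fin.2.isEmpty then fin.1 else fin.1 ++ [fin.2]
  String.mk (PySem.Chars.join ['_'] results)

-- ===== PRECONDITION & SPEC =====
def Spec_generate_machine_readable_name (display_name : String) (keep_case : Bool) (out : String) : Prop := out = generate_machine_readable_name_alt display_name keep_case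
instance (display_name : String) (keep_case : Bool) (out : String) : Decidable (Spec_generate_machine_readable_name display_name keep_case out) := by unfold Spec_generate_machine_readable_name; infer_instance

-- ===== CLAIM (what is proved, stated in full; the proofs are below) =====
def Claim_equal_generate_machine_readable_name : Prop := ∀ (display_name : String) (keep_case : Bool), Dom_generate_machine_readable_name display_name keep_case → Spec_generate_machine_readable_name display_name keep_case (generate_machine_readable_name display_name keep_case)

-- ===== LEMMAS AND PROOFS =====

-- the per-character conversion both programs apply to kept characters
def pvConv (keep_case : Bool) (c : Char) : Char := if keep_case then c else PySem.Chars.lowerChar c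

-- "clean a word": keep alnum characters, convert them
def pvClean (keep_case : Bool) (w : List Char) : List Char :=
  (w.filter PySem.Chars.isalnum).map (pvConv keep_case)

-- reference splitter on the single character ' '
def pvSplit1 : List Char → List (List Char)
  | [] => [[]]
  | c :: cs =>
    if c = ' ' then [] :: pvSplit1 cs
    else match pvSplit1 cs with
      | [] => [[c]]
      | w :: ws => (c :: w) :: ws

-- prepend a prefix onto the first piece
def pvMod (pre : List Char) : List (List Char) → List (List Char)
  | [] => [pre]
  | w :: ws => (pre ++ w) :: ws

lemma pvSplit1_ne_nil (cs : List Char) : pvSplit1 cs ≠ [] := by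
  cases cs with
  | nil => simp [pvSplit1]
  | cons c cs =>
    simp only [pvSplit1]
    split_ifs with h
    · simp
    · cases hs : pvSplit1 cs <;> simp

lemma pvMod_nil {ws : List (List Char)} (h : ws ≠ []) : pvMod [] ws = ws := by
  cases ws with
  | nil => exact absurd rfl h
  | cons w ws => simp [pvMod]

-- PySem.Chars.splitOn.go on separator [' '] computes pvSplit1
lemma go_split1 : ∀ (fuel : Nat) (l cur : List Char) (acc : List (List Char)),
    l.length < fuel →
    PySem.Chars.splitOn.go [' '] fuel l cur acc = acc.reverse ++ pvMod cur.reverse (pvSplit1 l) := by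
  intro fuel
  induction fuel with
  | zero => intro l cur acc h; omega
  | succ f ih =>
    intro l cur acc h
    cases l with
    | nil => simp [PySem.Chars.splitOn.go, pvSplit1, pvMod]
    | cons c rest =>
      simp only [PySem.Chars.splitOn.go]
      by_cases hc : c = ' '
      · have hpre : List.isPrefixOf [' '] (c :: rest) = true := by
          simp [List.isPrefixOf, hc]
        rw [hpre]
        simp only [if_true]
        rw [show List.drop [' '].length (c :: rest) = rest from rfl]
        rw [ih rest [] (cur.reverse :: acc) (by simpa using h)]
        subst hc
        have hsp : pvSplit1 (' ' :: rest) = [] :: pvSplit1 rest := by simp [pvSplit1]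
        rw [hsp, show ([] : List Char).reverse = ([] : List Char) from rfl,
          pvMod_nil (pvSplit1_ne_nil rest)]
        cases hs : pvSplit1 rest with
        | nil => exact absurd hs (pvSplit1_ne_nil rest)
        | cons w ws => simp [pvMod]
      · have hpre : List.isPrefixOf [' '] (c :: rest) = false := by
          simp [List.isPrefixOf]
          exact fun h' => absurd h'.symm hc
        rw [hpre]
        simp only [Bool.false_eq_true, if_false]
        rw [ih rest (c :: cur) acc (by simpa using h)]
        simp only [pvSplit1, hc, if_false]
        cases hs : pvSplit1 rest with
        | nil => exact absurd hs (pvSplit1_ne_nil rest)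
        | cons w ws => simp [pvMod]

lemma splitOn_space (l : List Char) :
    PySem.Chars.splitOn l [' '] = pvSplit1 l := by
  unfold PySem.Chars.splitOn
  rw [go_split1 (l.length + 1) l [] [] (by omega)]
  simp [pvMod_nil (pvSplit1_ne_nil l)]

-- whitespace characters are never alphanumeric
lemma isalnum_of_isspace {c : Char} (h : PySem.Chars.isspace c = true) :
    PySem.Chars.isalnum c = false := by
  unfold PySem.Chars.isspace at h
  unfold PySem.Chars.isalnum PySem.Chars.isalpha PySem.Chars.isdigit PySem.Chars.isupper PySem.Chars.islower
  simp only [Char.le_def, UInt32.le_iff_toNat_le, Char.toNat] at *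
  simp only [Bool.or_eq_true, Bool.and_eq_true, decide_eq_true_eq] at h
  simp only [Bool.or_eq_false_iff, Bool.and_eq_false_iff, decide_eq_false_iff_not, not_le]
  have hA : ('A' : Char).val.toNat = 65 := rfl
  have hZ : ('Z' : Char).val.toNat = 90 := rfl
  have ha : ('a' : Char).val.toNat = 97 := rfl
  have hz : ('z' : Char).val.toNat = 122 := rfl
  have h0 : ('0' : Char).val.toNat = 48 := rfl
  have h9 : ('9' : Char).val.toNat = 57 := rfl
  omega

lemma filter_dropWhile_isspace (l : List Char) :
    (l.dropWhile PySem.Chars.isspace).filter PySem.Chars.isalnum = l.filter PySem.Chars.isalnum := by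
  conv_rhs => rw [← List.takeWhile_append_dropWhile (p := PySem.Chars.isspace) (l := l)]
  rw [List.filter_append]
  have : (l.takeWhile PySem.Chars.isspace).filter PySem.Chars.isalnum = [] := by
    rw [List.filter_eq_nil_iff]
    intro c hc
    simp [isalnum_of_isspace (List.mem_takeWhile_imp hc)]
  rw [this, List.nil_append]

-- stripping whitespace does not change the kept (alnum) characters
lemma filter_strip (w : List Char) :
    (PySem.Chars.strip w).filter PySem.Chars.isalnum = w.filter PySem.Chars.isalnum := by
  unfold PySem.Chars.strip PySem.Chars.rstrip PySem.Chars.lstrip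
  rw [List.filter_reverse, filter_dropWhile_isspace, List.filter_reverse, List.reverse_reverse,
    filter_dropWhile_isspace]

-- A computes: clean each space-separated piece, drop empties, join with '_'
lemma portA_eq (dn : String) (k : Bool) :
    generate_machine_readable_name dn k =
      String.mk (PySem.Chars.join ['_']
        (((pvSplit1 dn.toList).map (pvClean k)).filter (fun w => !w.isEmpty))) := by
  unfold generate_machine_readable_name
  rw [splitOn_space]
  cases k with
  | true =>
    simp only [if_true, List.map_map]
    have hfun : ((fun word => PySem.Chars.join [] ((word.filter PySem.Chars.isalnum).map (fun c => [c]))) ∘ PySem.Chars.strip) = pvClean true := by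
      funext w
      simp only [Function.comp]
      rw [PySem.Chars.join_nil_singletons, filter_strip]
      simp only [pvClean]
      rw [show pvConv true = id from rfl, List.map_id]
    rw [hfun]
  | false =>
    simp only [Bool.false_eq_true, if_false, List.map_map]
    have hfun : ((fun word => PySem.Chars.join [] ((word.filter PySem.Chars.isalnum).map (fun c => PySem.Chars.lower [c]))) ∘ PySem.Chars.strip) = pvClean false := by
      funext w
      have h1 : ∀ (l : List Char), l.map (fun c => PySem.Chars.lower [c]) = (l.map PySem.Chars.lowerChar).map (fun c => [c]) := by
        intro l; simp [PySem.Chars.lower]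
      simp only [Function.comp]
      rw [h1, PySem.Chars.join_nil_singletons]
      simp [filter_strip, pvClean, pvConv]
    rw [hfun]

-- the loop invariant for B's single pass
lemma loopB (k : Bool) : ∀ (cs : List Char) (rs : List (List Char)) (buf : List Char),
    (let fin := cs.foldl (fun (st : List (List Char) × List Char) (c : Char) =>
        if c = ' ' then
          (if st.2.isEmpty then st.1 else st.1 ++ [st.2], [])
        else if PySem.Chars.isalnum c then
          (st.1, st.2 ++ [if k then c else PySem.Chars.lowerChar c])
        else st) (rs, buf);
     if fin.2.isEmpty then fin.1 else fin.1 ++ [fin.2])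
    = rs ++ (pvMod buf ((pvSplit1 cs).map (pvClean k))).filter (fun w => !w.isEmpty) := by
  intro cs
  induction cs with
  | nil =>
    intro rs buf
    simp only [List.foldl_nil, pvSplit1, List.map, pvClean, List.filter_nil, List.map_nil, pvMod,
      List.append_nil, List.filter]
    cases buf <;> simp
  | cons c cs ih =>
    intro rs buf
    simp only [List.foldl_cons]
    by_cases hc : c = ' '
    · subst hc
      rw [if_pos rfl]
      rw [ih]
      have hsp : pvSplit1 (' ' :: cs) = [] :: pvSplit1 cs := by simp [pvSplit1]
      rw [hsp, List.map_cons]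
      rw [pvMod_nil (by simp [pvSplit1_ne_nil cs])]
      have h0 : pvClean k ([] : List Char) = [] := rfl
      rw [h0]
      simp only [pvMod, List.append_nil, List.filter_cons]
      cases hb : buf.isEmpty
      · simp [hb]
      · have hbe : buf = [] := by cases buf <;> simp_all
        simp [hbe]
    · have hsp : pvSplit1 (c :: cs) = pvMod [c] (pvSplit1 cs) := by
        cases hs : pvSplit1 cs with
        | nil => exact absurd hs (pvSplit1_ne_nil cs)
        | cons w ws => simp [pvSplit1, hc, hs, pvMod]
      cases ha : PySem.Chars.isalnum c
      · simp only [if_neg hc, ha, Bool.false_eq_true, if_false]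
        rw [ih, hsp]
        cases hs : pvSplit1 cs with
        | nil => exact absurd hs (pvSplit1_ne_nil cs)
        | cons w ws =>
          simp only [pvMod, List.map_cons, List.singleton_append]
          have hcl : pvClean k (c :: w) = pvClean k w := by simp [pvClean, ha]
          rw [hcl]
      · simp only [if_neg hc, ha, if_true]
        rw [ih, hsp]
        cases hs : pvSplit1 cs with
        | nil => exact absurd hs (pvSplit1_ne_nil cs)
        | cons w ws =>
          simp only [pvMod, List.map_cons, List.singleton_append]
          have hcl : pvClean k (c :: w) = (if k then c else PySem.Chars.lowerChar c) :: pvClean k w := by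
            simp only [pvClean, List.filter_cons, ha, if_true, List.map_cons]
            cases k <;> simp [pvConv]
          rw [hcl]
          simp [List.append_assoc]

lemma portB_eq (dn : String) (k : Bool) :
    generate_machine_readable_name_alt dn k =
      String.mk (PySem.Chars.join ['_']
        (((pvSplit1 dn.toList).map (pvClean k)).filter (fun w => !w.isEmpty))) := by
  unfold generate_machine_readable_name_alt
  simp only []
  rw [loopB k dn.toList [] []]
  have hne : (pvSplit1 dn.toList).map (pvClean k) ≠ [] := by
    simp [pvSplit1_ne_nil dn.toList]
  rw [pvMod_nil hne, List.nil_append]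

-- ===== VERDICT (by name: the statement is the Claim_ definition above) =====
theorem generate_machine_readable_name_spec : Claim_equal_generate_machine_readable_name := by
  intro dn k _
  unfold Spec_generate_machine_readable_name
  rw [portA_eq, portB_eq]
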